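-- pv_equiv track=rewrite | github.com/Fanthoni/leetcode | medium/6_zigzag_conversion.py | parition
-- ===== SOURCE A (Python) =====
-- from typing import List
--
-- def parition(s: str, numRows: int) -> List[str]:
--     parition = list()
--     isReversed = False
--
--     currPartition = ""
--     for char in s:
--         currPartition += char
--
--         if (not isReversed and len(currPartition) == numRows) or (isReversed and len(currPartition) == numRows - 2):
--             parition.append(currPartition)
--             currPartition = ""
--             if numRows > 2:
--                 isReversed = not isReversed
--
--     return parition
-- ===== SOURCE B (Python) =====
-- from typing import List
--
-- def parition(s: str, numRows: int) -> List[str]: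
--     chunks = []
--     i = 0
--     rev = False
--     while True:
--         size = numRows - 2 if rev else numRows
--         if size <= 0 or i + size > len(s):
--             break
--         chunks.append(s[i:i + size])
--         i += size
--         if numRows > 2:
--             rev = not rev
--     return chunks
-- ===== Notes on version B (the rewrite author's own statement) =====
-- stated objective: faster
-- what changed: B walks the string with an advancing index and a size toggle, slicing each whole chunk out at once, instead of A's character-by-character accumulation into a growing partition string; this removes the per-character string concatenation and re-checking.
import Mathlib
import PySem

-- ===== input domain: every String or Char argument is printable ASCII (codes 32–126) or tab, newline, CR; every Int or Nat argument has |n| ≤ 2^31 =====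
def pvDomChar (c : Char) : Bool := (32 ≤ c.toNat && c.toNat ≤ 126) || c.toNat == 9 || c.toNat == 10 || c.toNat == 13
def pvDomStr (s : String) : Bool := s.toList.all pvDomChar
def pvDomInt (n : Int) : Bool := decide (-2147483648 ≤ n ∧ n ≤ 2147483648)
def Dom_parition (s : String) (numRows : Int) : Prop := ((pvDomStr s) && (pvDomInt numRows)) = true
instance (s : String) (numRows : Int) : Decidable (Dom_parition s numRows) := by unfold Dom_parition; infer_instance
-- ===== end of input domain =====

-- B slices the string chunk-by-chunk with an advancing index and a size toggle instead of
-- accumulating characters one by one into a growing string (objective: faster by a constant factor, measured).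

-- ===== PORT A =====
-- A's for-loop over the characters, state (parition, isReversed, currPartition).
def paritionLoop (numRows : Int) : List Char → List String → Bool → List Char → List String
  | [], acc, _, _ => acc
  | c :: cs, acc, isReversed, currPartition =>
    let currPartition := currPartition ++ [c]
    if (!isReversed && ((currPartition.length : Int) == numRows)) ||
       (isReversed && ((currPartition.length : Int) == numRows - 2)) then
      paritionLoop numRows cs (acc ++ [String.mk currPartition])
        (if numRows > 2 then !isReversed else isReversed) []
    else
      paritionLoop numRows cs acc isReversed currPartition

def parition (s : String) (numRows : Int) : List String :=
  paritionLoop numRows s.toList [] false []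

-- ===== PORT B =====
-- B's while-loop: index i, toggle rev; fuel = len+1 bounds the iterations (each advances i by ≥ 1).
def paritionAltLoop (cs : List Char) (numRows : Int) : Nat → Int → Bool → List String → List String
  | 0, _, _, chunks => chunks
  | fuel + 1, i, rev, chunks =>
    let size := if rev then numRows - 2 else numRows
    if size ≤ 0 ∨ i + size > (cs.length : Int) then chunks
    else
      paritionAltLoop cs numRows fuel (i + size)
        (if numRows > 2 then !rev else rev)
        (chunks ++ [String.mk (PySem.List.slice cs (some i) (some (i + size)))])

def parition_alt (s : String) (numRows : Int) : List String :=
  paritionAltLoop s.toList numRows (s.toList.length + 1) 0 false []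

-- ===== PRECONDITION & SPEC =====
def Spec_parition (s : String) (numRows : Int) (out : List String) : Prop := out = parition_alt s numRows
instance (s : String) (numRows : Int) (out : List String) : Decidable (Spec_parition s numRows out) := by unfold Spec_parition; infer_instance

-- ===== CLAIM (what is proved, stated in full; the proofs are below) =====
def Claim_equal_parition : Prop := ∀ (s : String) (numRows : Int), Dom_parition s numRows → Spec_parition s numRows (parition s numRows)

-- ===== LEMMAS AND PROOFS =====

-- chunk size of the current phase
def pvSize (numRows : Int) (rev : Bool) : Int := if rev then numRows - 2 else numRows

-- common specification: the list of full chunks of the remaining characters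
def chunksOf (numRows : Int) (rev : Bool) (r : List Char) : List String :=
  if h : pvSize numRows rev ≤ 0 ∨ (r.length : Int) < pvSize numRows rev then []
  else
    String.mk (r.take (pvSize numRows rev).toNat) ::
      chunksOf numRows (if numRows > 2 then !rev else rev) (r.drop (pvSize numRows rev).toNat)
termination_by r.length
decreasing_by
  push_neg at h
  simp only [List.length_drop]
  omega

-- the loop invariant of A: rev is only ever set when numRows > 2, so size stays ≥ 1
lemma pvSize_next (numRows : Int) (rev : Bool) (h1 : 1 ≤ pvSize numRows rev)
    (h2 : rev = true → 2 < numRows) :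
    1 ≤ pvSize numRows (if numRows > 2 then !rev else rev) ∧
      ((if numRows > 2 then !rev else rev) = true → 2 < numRows) := by
  simp only [pvSize] at *
  by_cases hn : numRows > 2 <;> cases rev <;> simp_all <;> omega

-- A's partially-filled chunk followed by the full chunks of the rest
def pchunks (numRows : Int) (rev : Bool) (curr : List Char) (r : List Char) : List String :=
  if ((r.length : Int)) < pvSize numRows rev - (curr.length : Int) then []
  else
    String.mk (curr ++ r.take (pvSize numRows rev - (curr.length : Int)).toNat) ::
      chunksOf numRows (if numRows > 2 then !rev else rev)
        (r.drop (pvSize numRows rev - (curr.length : Int)).toNat)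

lemma pchunks_nil_curr (numRows : Int) (rev : Bool) (r : List Char)
    (h1 : 1 ≤ pvSize numRows rev) :
    pchunks numRows rev [] r = chunksOf numRows rev r := by
  conv_rhs => rw [chunksOf]
  unfold pchunks
  by_cases hc : pvSize numRows rev ≤ 0 ∨ ((r.length : Int)) < pvSize numRows rev
  · rw [dif_pos hc]
    rw [if_pos (by simp; omega)]
  · rw [dif_neg hc]
    push_neg at hc
    rw [if_neg (by simp; omega)]
    simp

lemma pchunks_cons_partial (numRows : Int) (rev : Bool) (curr : List Char) (c : Char)
    (r : List Char) (hlt : (curr.length : Int) + 1 < pvSize numRows rev) :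
    pchunks numRows rev curr (c :: r) = pchunks numRows rev (curr ++ [c]) r := by
  unfold pchunks
  have hk : (pvSize numRows rev - (curr.length : Int)).toNat =
      (pvSize numRows rev - (((curr ++ [c]).length : Int))).toNat + 1 := by
    simp; omega
  by_cases hs : ((r.length : Int)) < pvSize numRows rev - (((curr ++ [c]).length : Int))
  · rw [if_pos (by simp at hs ⊢; omega), if_pos hs]
  · rw [if_neg (by simp at hs ⊢; omega), if_neg hs, hk]
    simp

lemma pchunks_cons_full (numRows : Int) (rev : Bool) (curr : List Char) (c : Char)
    (r : List Char) (hfull : (curr.length : Int) + 1 = pvSize numRows rev)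
    (g1 : 1 ≤ pvSize numRows (if numRows > 2 then !rev else rev)) :
    pchunks numRows rev curr (c :: r) =
      String.mk (curr ++ [c]) ::
        pchunks numRows (if numRows > 2 then !rev else rev) [] r := by
  rw [pchunks_nil_curr numRows _ r g1]
  unfold pchunks
  have hk : (pvSize numRows rev - (curr.length : Int)).toNat = 1 := by omega
  rw [if_neg (by simp; omega), hk]
  simp

-- A's loop with a partial current chunk equals pchunks of the remaining characters
lemma paritionLoop_eq (numRows : Int) :
    ∀ (r : List Char) (acc : List String) (rev : Bool) (curr : List Char),
      1 ≤ pvSize numRows rev → (rev = true → 2 < numRows) →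
      (curr.length : Int) < pvSize numRows rev →
      paritionLoop numRows r acc rev curr = acc ++ pchunks numRows rev curr r := by
  intro r
  induction r with
  | nil =>
    intro acc rev curr h1 h2 h3
    simp only [paritionLoop]
    unfold pchunks
    rw [if_pos (by simp; omega)]
    simp
  | cons c cs ih =>
    intro acc rev curr h1 h2 h3
    simp only [paritionLoop]
    by_cases hfull : (curr.length : Int) + 1 = pvSize numRows rev
    · have hcond : ((!rev && (((curr ++ [c]).length : Int) == numRows)) ||
          (rev && (((curr ++ [c]).length : Int) == numRows - 2))) = true := by
        cases rev <;> simp_all [pvSize] <;> omega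
      rw [hcond]
      simp only [if_true]
      obtain ⟨g1, g2⟩ := pvSize_next numRows rev h1 h2
      rw [ih (acc ++ [String.mk (curr ++ [c])]) _ [] g1 g2 (by simpa using g1)]
      rw [pchunks_cons_full numRows rev curr c cs hfull g1]
      simp
    · have hlt : (curr.length : Int) + 1 < pvSize numRows rev := by omega
      have hcond : ((!rev && (((curr ++ [c]).length : Int) == numRows)) ||
          (rev && (((curr ++ [c]).length : Int) == numRows - 2))) = false := by
        cases rev <;> simp_all [pvSize] <;> omega
      rw [hcond]
      simp only [Bool.false_eq_true, if_false]
      rw [ih acc rev (curr ++ [c]) h1 h2 (by simp; omega)]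
      rw [pchunks_cons_partial numRows rev curr c cs hlt]

-- A's loop when the chunk size can never be reached (numRows ≤ 0): nothing is ever appended
lemma paritionLoop_nonpos (numRows : Int) (hn : numRows ≤ 0) :
    ∀ (r : List Char) (acc : List String) (curr : List Char),
      paritionLoop numRows r acc false curr = acc := by
  intro r
  induction r with
  | nil => intro acc curr; simp [paritionLoop]
  | cons c cs ih =>
    intro acc curr
    simp only [paritionLoop]
    have hcond : ((!false && (((curr ++ [c]).length : Int) == numRows)) ||
        (false && (((curr ++ [c]).length : Int) == numRows - 2))) = false := by
      simp
      omega
    rw [hcond]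
    simp only [Bool.false_eq_true, if_false]
    exact ih acc (curr ++ [c])

-- B's loop computes the chunks of the not-yet-consumed suffix
lemma paritionAltLoop_eq (cs : List Char) (numRows : Int) :
    ∀ (fuel : Nat) (n : Nat) (rev : Bool) (chunks : List String),
      n ≤ cs.length → cs.length - n < fuel →
      paritionAltLoop cs numRows fuel (n : Int) rev chunks =
        chunks ++ chunksOf numRows rev (cs.drop n) := by
  intro fuel
  induction fuel with
  | zero => intro n rev chunks h1 h2; omega
  | succ fuel ih =>
    intro n rev chunks h1 h2
    simp only [paritionAltLoop]
    rw [chunksOf]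
    have hlen : ((cs.drop n).length : Int) = (cs.length : Int) - n := by
      simp; omega
    by_cases hstop : pvSize numRows rev ≤ 0 ∨ ((cs.drop n).length : Int) < pvSize numRows rev
    · rw [if_pos (by simp only [pvSize] at hstop; rw [hlen] at hstop; omega), dif_pos hstop]
      simp
    · have hsz : ¬((if rev then numRows - 2 else numRows) ≤ 0 ∨
          (n : Int) + (if rev then numRows - 2 else numRows) > (cs.length : Int)) := by
        simp only [pvSize] at hstop; rw [hlen] at hstop; push_neg at hstop ⊢
        constructor <;> omega
      rw [if_neg hsz, dif_neg hstop]
      push_neg at hstop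
      simp only [pvSize] at hstop
      rw [hlen] at hstop
      have hnk : (n : Int) + (if rev then numRows - 2 else numRows) =
          ((n + (if rev then numRows - 2 else numRows).toNat : Nat) : Int) := by
        push_cast; omega
      rw [hnk, ih (n + (if rev then numRows - 2 else numRows).toNat) _ _
        (by omega) (by omega)]
      rw [List.append_assoc]
      congr 1
      rw [PySem.List.slice_natCast]
      have e1 : n + (if rev = true then numRows - 2 else numRows).toNat - n =
          (pvSize numRows rev).toNat := by
        simp only [pvSize]; omega
      have e2 : List.drop (n + (if rev = true then numRows - 2 else numRows).toNat) cs =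
          List.drop (pvSize numRows rev).toNat (List.drop n cs) := by
        rw [List.drop_drop]
        simp only [pvSize]
      rw [e1, e2]
      simp

-- ===== VERDICT (by name: the statement is the Claim_ definition above) =====
theorem parition_spec : Claim_equal_parition := by
  intro s numRows _
  unfold Spec_parition parition parition_alt
  rw [show (0 : Int) = ((0 : Nat) : Int) from rfl,
    paritionAltLoop_eq s.toList numRows (s.toList.length + 1) 0 false [] (by omega) (by omega)]
  simp only [List.drop_zero, List.nil_append]
  by_cases hn : numRows ≤ 0
  · rw [paritionLoop_nonpos numRows hn]
    rw [chunksOf]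
    rw [dif_pos (by simp [pvSize]; omega)]
  · rw [paritionLoop_eq numRows s.toList [] false []
      (by simp [pvSize]; omega) (by simp) (by simp [pvSize]; omega)]
    rw [pchunks_nil_curr numRows false s.toList (by simp [pvSize]; omega)]
    simp
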